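-- pv_equiv track=rewrite | github.com/Richard-B18/codeit-suisse-indomie-2022 | codeitsuisse/routes/socialdistancing.py | rec
-- ===== SOURCE A (Python) =====
-- from copy import deepcopy
--
-- def rec(hash, n):
--     count = 0
--     # n is people remaining
--     if n > len(hash):
--         return 0
--
--     if n == 0:
--         return 1
--
--     for k, v in hash.items():
--         temp = deepcopy(hash)
--
--         del temp[k]
--
--         r, c = k
--         for i in range(-1, 2):
--             for j in range(-1, 2):
--                 if (r + i, c + j) in temp:
--                     del temp[(r + i, c + j)]
--         count += rec(temp, n - 1)
--
--     return count
-- ===== SOURCE B (Python) =====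
-- def rec(hash, n):
--     # Count unordered independent (no two cells king-adjacent) n-subsets by
--     # scanning cells in a fixed order, then multiply by n! orderings.
--     if n < 0 or n > len(hash):
--         return 0
--     cells = list(hash)
--
--     def count_sets(cells, n):
--         if n == 0:
--             return 1
--         if len(cells) < n:
--             return 0
--         (r, c), rest = cells[0], cells[1:]
--         compat = [(r2, c2) for (r2, c2) in rest if abs(r2 - r) > 1 or abs(c2 - c) > 1]
--         with_first = count_sets(compat, n - 1)
--         without_first = count_sets(rest, n)
--         return with_first + without_first
--
--     fact = 1
--     for i in range(2, n + 1):
--         fact *= i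
--     return count_sets(cells, n) * fact
-- ===== Notes on version B (the rewrite author's own statement) =====
-- stated objective: faster
-- what changed: A recursively tries every cell as the next person, deep-copying the whole dict and deleting the 3x3 neighbourhood at each step, so it enumerates all n! orderings of every valid placement; B counts unordered independent sets once, scanning cells in a fixed order (take-or-skip the first cell, filtering out king-adjacent cells), and multiplies the count by n! computed with one product loop.
import Mathlib
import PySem

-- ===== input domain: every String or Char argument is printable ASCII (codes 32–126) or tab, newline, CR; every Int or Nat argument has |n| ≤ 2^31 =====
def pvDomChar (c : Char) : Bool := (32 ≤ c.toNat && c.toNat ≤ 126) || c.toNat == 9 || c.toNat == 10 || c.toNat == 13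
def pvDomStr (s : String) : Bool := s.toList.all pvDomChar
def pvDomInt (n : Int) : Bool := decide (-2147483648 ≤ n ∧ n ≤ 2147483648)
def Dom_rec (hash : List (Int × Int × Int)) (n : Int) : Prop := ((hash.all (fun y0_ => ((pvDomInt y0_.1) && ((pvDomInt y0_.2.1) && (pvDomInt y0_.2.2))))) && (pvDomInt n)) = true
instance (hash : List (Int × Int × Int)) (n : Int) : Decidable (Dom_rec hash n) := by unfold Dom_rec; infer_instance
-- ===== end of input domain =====

-- B counts unordered independent sets in fixed scan order and multiplies by n!
-- instead of A's recursion over every ordering with a fresh dict copy per pick;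
-- equality of the RETURN value is what is proved (neither side mutates input).

-- The dict argument arrives as its item list (r, c, v); the values v are never
-- read by either program — both work on the key list.
def pyKeys (hash : List (Int × Int × Int)) : List (Int × Int) :=
  hash.map (fun e => (e.1, e.2.1))

-- ===== PORT A =====
-- the inner double loop: for i in range(-1,2): for j in range(-1,2):
--   if (r+i, c+j) in temp: del temp[(r+i, c+j)]
def delNbrs (r c : Int) (temp : List (Int × Int)) : List (Int × Int) :=
  (PySem.List.pyRange (-1) 2 1).foldl (fun acc i =>
    (PySem.List.pyRange (-1) 2 1).foldl (fun acc2 j =>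
      if (r + i, c + j) ∈ acc2 then acc2.erase (r + i, c + j) else acc2) acc) temp

lemma delNbrs_length_le (r c : Int) (s : List (Int × Int)) :
    (delNbrs r c s).length ≤ s.length := by
  have step : ∀ (a : List (Int × Int)) (k : Int × Int),
      (if k ∈ a then a.erase k else a).length ≤ a.length := by
    intro a k; split
    · exact List.length_erase_le
    · exact le_rfl
  have inner : ∀ (L : List Int) (a : List (Int × Int)) (i : Int),
      (L.foldl (fun acc2 j =>
        if (r + i, c + j) ∈ acc2 then acc2.erase (r + i, c + j) else acc2) a).length ≤ a.length := by
    intro L; induction L with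
    | nil => intro a i; exact le_rfl
    | cons x xs ih => intro a i; exact le_trans (ih _ i) (step a _)
  have outer : ∀ (L : List Int) (a : List (Int × Int)),
      (L.foldl (fun acc i =>
        (PySem.List.pyRange (-1) 2 1).foldl (fun acc2 j =>
          if (r + i, c + j) ∈ acc2 then acc2.erase (r + i, c + j) else acc2) acc) a).length ≤ a.length := by
    intro L; induction L with
    | nil => intro a; exact le_rfl
    | cons x xs ih => intro a; exact le_trans (ih _) (inner _ a x)
  exact outer _ s

-- A's recursion on the dict's key list: each loop iteration copies the dict,
-- deletes k and its 8 neighbours, and recurses with n-1.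
def recAux (l : List (Int × Int)) (n : Int) : Int :=
  if n > (l.length : Int) then 0
  else if n = 0 then 1
  else l.attach.foldl (fun count k =>
    count + recAux (delNbrs k.1.1 k.1.2 (l.erase k.1)) (n - 1)) 0
termination_by l.length
decreasing_by
  have h1 := delNbrs_length_le k.1.1 k.1.2 (l.erase k.1)
  have h2 := List.length_erase_of_mem k.2
  have h3 := List.length_pos_of_mem k.2
  omega

def rec (hash : List (Int × Int × Int)) (n : Int) : Int :=
  recAux (pyKeys hash) n

-- ===== PORT B =====
-- abs(r2-r) > 1 or abs(c2-c) > 1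
def far (x y : Int × Int) : Bool :=
  1 < (y.1 - x.1).natAbs || 1 < (y.2 - x.2).natAbs

-- count_sets: number of n-element pairwise-far subsets, first cell in or out
def countSets (cells : List (Int × Int)) (n : Int) : Int :=
  if n = 0 then 1
  else if (cells.length : Int) < n then 0
  else match cells with
  | [] => 0  -- unreachable: [] has length 0 < n here; kept for totality
  | x :: rest => countSets (rest.filter (far x)) (n - 1) + countSets rest n
termination_by cells.length
decreasing_by
  · simp only [List.length_unattach, List.length_cons]
    exact Nat.lt_succ_of_le (le_trans (List.length_filter_le _ _) (by simp))
  · simp only [List.length_cons]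
    exact Nat.lt_succ_self _

-- fact = 1; for i in range(2, n+1): fact *= i
def pyFact (n : Int) : Int :=
  (PySem.List.pyRange 2 (n + 1) 1).foldl (fun f i => f * i) 1

def rec_alt (hash : List (Int × Int × Int)) (n : Int) : Int :=
  if n < 0 ∨ n > (hash.length : Int) then 0
  else countSets (pyKeys hash) n * pyFact n

-- ===== PRECONDITION & SPEC =====
-- The list encodes a Python dict, so its keys (r, c) are pairwise distinct;
-- no dict maps to a duplicate-key list, hence no input of A is excluded.
def Pre_rec (hash : List (Int × Int × Int)) (n : Int) : Prop :=
  (pyKeys hash).Nodup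
instance (hash : List (Int × Int × Int)) (n : Int) : Decidable (Pre_rec hash n) := by
  unfold Pre_rec; infer_instance

def pvWitness_rec : (List (Int × Int × Int)) × Int := ([(0, 0, 7), (2, 2, 1), (0, 3, 0)], 2)

def Spec_rec (hash : List (Int × Int × Int)) (n : Int) (out : Int) : Prop := out = rec_alt hash n
instance (hash : List (Int × Int × Int)) (n : Int) (out : Int) : Decidable (Spec_rec hash n out) := by unfold Spec_rec; infer_instance

-- ===== CLAIM (what is proved, stated in full; the proofs are below) =====
def Claim_equal_rec : Prop := ∀ (hash : List (Int × Int × Int)) (n : Int), Dom_rec hash n → Pre_rec hash n → Spec_rec hash n (rec hash n)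

-- ===== LEMMAS AND PROOFS =====

-- integer sum of a function over a list
def isum (l : List (Int × Int)) (f : Int × Int → Int) : Int := (l.map f).sum

lemma foldl_add_isum (f : Int × Int → Int) :
    ∀ (l : List (Int × Int)) (a : Int), l.foldl (fun c x => c + f x) a = a + isum l f := by
  intro l; induction l with
  | nil => intro a; simp [isum]
  | cons x xs ih => intro a; simp [isum, List.foldl_cons, ih, List.map_cons]; ring

lemma isum_congr {l : List (Int × Int)} {f g : Int × Int → Int}
    (h : ∀ x ∈ l, f x = g x) : isum l f = isum l g := by
  unfold isum; rw [List.map_congr_left h]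

lemma isum_add (l : List (Int × Int)) (f g : Int × Int → Int) :
    isum l (fun x => f x + g x) = isum l f + isum l g := by
  induction l with
  | nil => simp [isum]
  | cons x xs ih => simp [isum, List.map_cons] at *; omega

lemma isum_mul_right (l : List (Int × Int)) (f : Int × Int → Int) (c : Int) :
    isum l (fun x => f x * c) = isum l f * c := by
  induction l with
  | nil => simp [isum]
  | cons x xs ih => simp [isum, List.map_cons] at *; rw [ih]; ring

lemma isum_ite_filter (l : List (Int × Int)) (p : Int × Int → Bool) (f : Int × Int → Int) :
    isum l (fun x => if p x then f x else 0) = isum (l.filter p) f := by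
  induction l with
  | nil => simp [isum]
  | cons x xs ih =>
    by_cases h : p x = true <;> simp [isum, h, List.map_cons] at * <;> omega

lemma isum_const_one (l : List (Int × Int)) : isum l (fun _ => 1) = (l.length : Int) := by
  induction l with
  | nil => simp [isum]
  | cons x xs ih => simp [isum, List.map_cons] at *; omega

-- a guarded dict deletion chain is a filter, for lists without duplicates
lemma eraseChain_eq_filter :
    ∀ (ks : List (Int × Int)) (s : List (Int × Int)), s.Nodup →
      ks.foldl (fun a k => if k ∈ a then a.erase k else a) s
        = s.filter (fun y => decide (y ∉ ks)) := by
  intro ks; induction ks with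
  | nil => intro s _; simp
  | cons k ks ih =>
    intro s hs
    have h1 : (if k ∈ s then s.erase k else s) = s.filter (fun y => y != k) := by
      split
      · exact List.Nodup.erase_eq_filter hs k
      · rename_i hk
        rw [eq_comm, List.filter_eq_self]
        intro y hy; simp; rintro rfl; exact hk hy
    rw [List.foldl_cons, h1, ih _ (hs.filter _), List.filter_filter]
    apply List.filter_congr; intro y _
    by_cases h2 : y = k <;> by_cases h3 : y ∈ ks <;> simp [h2, h3]

lemma delNbrs_eq_filter (r c : Int) (s : List (Int × Int)) (hs : s.Nodup) :
    delNbrs r c s = s.filter (far (r, c)) := by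
  have hr : PySem.List.pyRange (-1) 2 1 = [-1, 0, 1] := by decide
  have h9 : delNbrs r c s =
      [(r + -1, c + -1), (r + -1, c + 0), (r + -1, c + 1),
       (r + 0, c + -1), (r + 0, c + 0), (r + 0, c + 1),
       (r + 1, c + -1), (r + 1, c + 0), (r + 1, c + 1)].foldl
        (fun a k => if k ∈ a then a.erase k else a) s := by
    unfold delNbrs
    rw [hr]
    simp only [List.foldl_cons, List.foldl_nil]
  rw [h9, eraseChain_eq_filter _ _ hs]
  apply List.filter_congr
  intro y _
  obtain ⟨y1, y2⟩ := y
  rw [Bool.eq_iff_iff]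
  simp [far, Prod.ext_iff]
  omega

-- basic countSets facts
lemma countSets_zero (l : List (Int × Int)) : countSets l 0 = 1 := by
  unfold countSets; simp

lemma countSets_of_short (l : List (Int × Int)) (n : Int) (h : (l.length : Int) < n) :
    countSets l n = 0 := by
  unfold countSets
  have : ¬ n = 0 := by omega
  simp [this, h]

lemma countSets_cons (x : Int × Int) (t : List (Int × Int)) (n : Int) (hn : 0 < n) :
    countSets (x :: t) n = countSets (t.filter (far x)) (n - 1) + countSets t n := by
  by_cases h : ((x :: t).length : Int) < n
  · rw [countSets_of_short _ _ h]
    have h1 : ((t.filter (far x)).length : Int) < n - 1 := by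
      have := List.length_filter_le (far x) t
      simp [List.length_cons] at h
      omega
    have h2 : (t.length : Int) < n := by simp [List.length_cons] at h; omega
    rw [countSets_of_short _ _ h1, countSets_of_short _ _ h2]
    norm_num
  · have hz : ¬ n = 0 := by omega
    conv_lhs => rw [countSets]
    rw [if_neg hz, if_neg h]

lemma countSets_one (l : List (Int × Int)) : countSets l 1 = (l.length : Int) := by
  induction l with
  | nil => rw [countSets_of_short] <;> simp
  | cons x t ih =>
    rw [countSets_cons _ _ _ (by norm_num)]
    simp [countSets_zero, ih]
    omega

lemma natAbsSubComm (a b : Int) : (a - b).natAbs = (b - a).natAbs := by omega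

lemma far_comm (a b : Int × Int) : far a b = far b a := by
  unfold far
  rw [natAbsSubComm b.1 a.1, natAbsSubComm b.2 a.2]

-- n! recurrence for the product loop
lemma pyFact_succ (n : Int) (hn : 1 ≤ n) : pyFact n = pyFact (n - 1) * n := by
  by_cases h1 : n = 1
  · subst h1; decide
  · have h2 : (2:Int) ≤ n := by omega
    have hsplit : PySem.List.pyRange 2 (n + 1) 1 = PySem.List.pyRange 2 n 1 ++ [n] :=
      PySem.List.pyRange_one_succ_right h2
    have hshift : PySem.List.pyRange 2 (n - 1 + 1) 1 = PySem.List.pyRange 2 n 1 := by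
      norm_num
    unfold pyFact
    rw [hsplit, hshift, List.foldl_append, List.foldl_cons, List.foldl_nil]

-- the double count: summing the (n-1)-set counts of each cell's deleted board
-- counts every independent n-set once per member
lemma key_count :
    ∀ (m : Nat) (l : List (Int × Int)), l.length ≤ m → l.Nodup → ∀ (n : Int), 0 < n →
      isum l (fun k => countSets ((l.erase k).filter (far k)) (n - 1)) = n * countSets l n := by
  intro m
  induction m with
  | zero =>
    intro l hm _ n hn
    have : l = [] := List.eq_nil_of_length_eq_zero (Nat.le_zero.mp hm)
    subst this
    rw [countSets_of_short _ _ (by simp; omega)]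
    simp [isum]
  | succ m ih =>
    intro l hm hnd n hn
    match l with
    | [] =>
      rw [countSets_of_short _ _ (by simp; omega)]
      simp [isum]
    | x :: t =>
      have hxt : x ∉ t := (List.nodup_cons.mp hnd).1
      have hndt : t.Nodup := (List.nodup_cons.mp hnd).2
      have hmt : t.length ≤ m := by simpa using hm
      by_cases hn1 : n = 1
      · subst hn1
        simp only [show (1:Int) - 1 = 0 from rfl, countSets_zero]
        rw [isum_const_one, countSets_one]
        ring
      · have hn2 : 1 < n := by omega
        -- unfold the head term and rewrite each tail term
        have head_erase : (x :: t).erase x = t := List.erase_cons_head x t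
        have tail_term : ∀ k ∈ t,
            countSets (((x :: t).erase k).filter (far k)) (n - 1)
              = (if far k x then countSets (((t.erase k).filter (far k)).filter (far x)) (n - 1 - 1) else 0)
                + countSets ((t.erase k).filter (far k)) (n - 1) := by
          intro k hk
          have hkx : ¬ (x == k) = true := by
            simp; rintro rfl; exact hxt hk
          rw [List.erase_cons_tail hkx, List.filter_cons]
          by_cases hf : far k x = true
          · simp only [hf, if_true]
            rw [countSets_cons _ _ _ (by omega)]
          · simp only [hf]
            simp
        have expand : isum (x :: t)
            (fun k => countSets (((x :: t).erase k).filter (far k)) (n - 1))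
            = countSets (t.filter (far x)) (n - 1)
              + (isum (t.filter (fun k => far k x))
                  (fun k => countSets (((t.erase k).filter (far k)).filter (far x)) (n - 1 - 1))
                + isum t (fun k => countSets ((t.erase k).filter (far k)) (n - 1))) := by
          unfold isum
          rw [List.map_cons, List.sum_cons, head_erase]
          congr 1
          rw [show (t.map fun k => countSets (((x :: t).erase k).filter (far k)) (n - 1))
              = t.map (fun k =>
                  (if far k x then countSets (((t.erase k).filter (far k)).filter (far x)) (n - 1 - 1) else 0)
                  + countSets ((t.erase k).filter (far k)) (n - 1)) from
            List.map_congr_left tail_term]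
          have := isum_add t
            (fun k => if far k x then countSets (((t.erase k).filter (far k)).filter (far x)) (n - 1 - 1) else 0)
            (fun k => countSets ((t.erase k).filter (far k)) (n - 1))
          unfold isum at this
          rw [this]
          congr 1
          have := isum_ite_filter t (fun k => far k x)
            (fun k => countSets (((t.erase k).filter (far k)).filter (far x)) (n - 1 - 1))
          unfold isum at this
          rw [this]
        -- the filtered sum is key_count on the compatible sublist
        have hFc : t.filter (fun k => far k x) = t.filter (far x) :=
          List.filter_congr (fun y _ => far_comm y x)
        have hF : (t.filter (far x)).Nodup := hndt.filter _
        have hFlen : (t.filter (far x)).length ≤ m :=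
          le_trans (List.length_filter_le _ _) hmt
        have termEq : ∀ k ∈ t.filter (far x),
            ((t.erase k).filter (far k)).filter (far x)
              = ((t.filter (far x)).erase k).filter (far k) := by
          intro k hk
          rw [List.Nodup.erase_eq_filter hndt, List.Nodup.erase_eq_filter hF]
          simp only [List.filter_filter]
          apply List.filter_congr
          intro y _
          cases h1 : far k y <;> cases h2 : far x y <;> cases h3 : y != k <;> simp
        have inner_sum :
            isum (t.filter (fun k => far k x))
              (fun k => countSets (((t.erase k).filter (far k)).filter (far x)) (n - 1 - 1))
              = (n - 1) * countSets (t.filter (far x)) (n - 1) := by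
          rw [hFc]
          rw [isum_congr (fun k hk => by rw [termEq k hk])]
          exact ih (t.filter (far x)) hFlen hF (n - 1) (by omega)
        rw [expand, inner_sum, ih t hmt hndt n hn, countSets_cons _ _ _ hn]
        ring
-- recAux's loop as a sum
lemma recAux_loop (l : List (Int × Int)) (n : Int) (h1 : ¬ n > (l.length : Int)) (h2 : ¬ n = 0) :
    recAux l n = isum l (fun k => recAux (delNbrs k.1 k.2 (l.erase k)) (n - 1)) := by
  have h := List.foldl_attach (l := l)
    (f := fun (count : Int) y => count + recAux (delNbrs y.1 y.2 (l.erase y)) (n - 1)) (b := (0 : Int))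
  rw [recAux, if_neg h1, if_neg h2, h, foldl_add_isum]
  simp

lemma recAux_neg :
    ∀ (m : Nat) (l : List (Int × Int)), l.length ≤ m → ∀ (n : Int), n < 0 → recAux l n = 0 := by
  intro m
  induction m with
  | zero =>
    intro l hm n hn
    have : l = [] := List.eq_nil_of_length_eq_zero (Nat.le_zero.mp hm)
    subst this
    rw [recAux_loop _ _ (by simp; omega) (by omega)]
    simp [isum]
  | succ m ih =>
    intro l hm n hn
    rw [recAux_loop _ _ (by omega) (by omega)]
    rw [isum_congr (f := fun k => recAux (delNbrs k.1 k.2 (l.erase k)) (n - 1)) (g := fun _ => 0)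
      (fun k hk => ih _ (by
        have := delNbrs_length_le k.1 k.2 (l.erase k)
        have := List.length_erase_of_mem hk
        have := List.length_pos_of_mem hk
        omega) _ (by omega))]
    unfold isum
    simp

-- the main invariant: A's ordered count is n! times B's unordered count
lemma recAux_eq :
    ∀ (m : Nat) (l : List (Int × Int)), l.length ≤ m → l.Nodup → ∀ (n : Int), 0 ≤ n →
      recAux l n = countSets l n * pyFact n := by
  intro m
  induction m with
  | zero =>
    intro l hm _ n hn0
    have : l = [] := List.eq_nil_of_length_eq_zero (Nat.le_zero.mp hm)
    subst this
    by_cases hn : n = 0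
    · subst hn; rw [recAux]; simp [countSets_zero]; decide
    · rw [recAux]
      simp only [List.length_nil]
      rw [if_pos (by simp; omega)]
      rw [countSets_of_short _ _ (by simp; omega)]
      simp
  | succ m ih =>
    intro l hm hnd n hn0
    by_cases hbig : n > (l.length : Int)
    · rw [recAux, if_pos hbig, countSets_of_short _ _ (by omega)]
      simp
    · by_cases hn : n = 0
      · subst hn; rw [recAux, if_neg hbig]; simp [countSets_zero]
        have : pyFact 0 = 1 := by decide
        simp [this]
      · have hnpos : 0 < n := by omega
        rw [recAux_loop _ _ hbig hn]
        have step : ∀ k ∈ l,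
            recAux (delNbrs k.1 k.2 (l.erase k)) (n - 1)
              = countSets ((l.erase k).filter (far k)) (n - 1) * pyFact (n - 1) := by
          intro k hk
          have hek : (l.erase k).Nodup := hnd.erase k
          rw [delNbrs_eq_filter k.1 k.2 (l.erase k) hek]
          have hlen : ((l.erase k).filter (far (k.1, k.2))).length ≤ m := by
            have := List.length_filter_le (far (k.1, k.2)) (l.erase k)
            have := List.length_erase_of_mem hk
            have := List.length_pos_of_mem hk
            omega
          rw [ih _ hlen (hek.filter _) (n - 1) (by omega)]
        rw [isum_congr step]
        rw [isum_mul_right l (fun k => countSets ((l.erase k).filter (far k)) (n - 1)) (pyFact (n - 1))]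
        rw [key_count l.length l le_rfl hnd n hnpos]
        rw [pyFact_succ n (by omega)]
        ring

-- ===== VERDICT (by name: the statement is the Claim_ definition above) =====
theorem rec_spec : Claim_equal_rec := by
  intro hash n _ hpre
  unfold Spec_rec rec rec_alt
  have hlen : ((pyKeys hash).length : Int) = (hash.length : Int) := by
    simp [pyKeys]
  by_cases hneg : n < 0
  · rw [recAux_neg (pyKeys hash).length _ le_rfl n hneg, if_pos (Or.inl hneg)]
  · by_cases hbig : n > (hash.length : Int)
    · rw [if_pos (Or.inr hbig)]
      rw [recAux, if_pos (by omega)]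
    · rw [if_neg (by omega)]
      exact recAux_eq (pyKeys hash).length _ le_rfl hpre n (by omega)
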